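-- pv_equiv track=rewrite | github.com/JKottonen/Tiral-k2022-assignments | viikko-1/queenknight.py | count
-- ===== SOURCE A (Python) =====
-- def possible_knight_positions(n, matrix, queenY, queenX):
--     sum = 0
--     for y in range(n):
--         # Y axis not valid:
--         if y == queenY:
--             continue
--
--         for x in range(n):
--             # X axis not valid:
--             if x == queenX:
--                 continue
--
--             # Diagonal axis not valid:
--             if x - y == queenX - queenY or x + y == queenX + queenY:
--                 continue
--
--             # This one cover's the knights possible movements
--             # (and two squares on X or Y axis, which doesn't matter because the queen makes them invalid anyways)
--             if abs(queenY - y) <= 2 and abs(queenX - x) <= 2: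
--                 continue
--
--             matrix[y][x] = 2
--             sum += 1
--             #printMatrix(matrix)
--             matrix[y][x] = 0
--
--     return sum
--
-- def count(n: int):
--     sum = 0
--     matrix = [[0 for i in range(n)] for j in range(n)]
--     queen = 1
--
--     for y in range(n):
--         for x in range(n):
--             matrix[y][x] = queen
--             sum += possible_knight_positions(n, matrix, y, x)
--             matrix[y][x] = 0
--
--     return sum
-- ===== SOURCE B (Python) =====
-- def count(n: int):
--     # Per-row closed-form counting instead of scanning every square:
--     # for each queen (qy,qx) and each row y != qy, the forbidden x's are
--     # either a clipped 5-wide interval (when |y-qy| <= 2, the knight box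
--     # swallows the queen/diagonal squares in that row) or at most the
--     # three squares qx, qx+dy, qx-dy clipped to the board.
--     total = 0
--     for qy in range(n):
--         for qx in range(n):
--             for y in range(n):
--                 if y == qy:
--                     continue
--                 dy = y - qy
--                 if -2 <= dy <= 2:
--                     total += n - (min(qx + 2, n - 1) - max(qx - 2, 0) + 1)
--                 else:
--                     bad = 1
--                     if 0 <= qx + dy < n:
--                         bad += 1
--                     if 0 <= qx - dy < n:
--                         bad += 1
--                     total += n - bad
--     return total
-- ===== Notes on version B (the rewrite author's own statement) =====
-- stated objective: faster
-- what changed: A scans all n^2 board squares for every queen position (O(n^4)); B replaces the whole inner-square scan by an O(1) closed-form count per board row (the forbidden x's in a row are a clipped 5-wide interval when the row is within 2 of the queen, else at most three clipped points), giving O(n^3).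
import Mathlib
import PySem

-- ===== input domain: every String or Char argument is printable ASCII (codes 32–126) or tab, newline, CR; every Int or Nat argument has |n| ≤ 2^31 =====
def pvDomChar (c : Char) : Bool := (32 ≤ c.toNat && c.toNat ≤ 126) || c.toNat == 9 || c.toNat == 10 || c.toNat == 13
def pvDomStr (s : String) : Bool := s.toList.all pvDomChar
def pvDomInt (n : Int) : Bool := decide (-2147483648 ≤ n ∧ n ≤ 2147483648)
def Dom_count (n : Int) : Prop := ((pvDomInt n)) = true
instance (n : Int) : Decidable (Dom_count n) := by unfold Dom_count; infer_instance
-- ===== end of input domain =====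

-- B replaces A's O(n^4) scan of every (queen, square) pair by an O(1) per-row count
-- (a clipped interval / at most three clipped points of forbidden x's), O(n^3) total.
-- A's helper mutates (and restores) the matrix it is given; only the return value is claimed here.

-- ===== PORT A =====
-- possible_knight_positions: state is (matrix, sum). The matrix, a Python list of lists mutated in
-- place (every write is at an in-range nonnegative index and is written back), is carried as
-- Array (Array Int) with Array.modify so the ported writes are in-place like Python's;
-- Python's abs(a) <= 2 is ported as a.natAbs ≤ 2 (same truth value).
def possibleKnightPositions (n : Int) (matrix : Array (Array Int)) (queenY queenX : Int) :
    Array (Array Int) × Int :=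
  (PySem.List.pyRange 0 n 1).foldl (fun st y =>
    if y = queenY then st else
    (PySem.List.pyRange 0 n 1).foldl (fun st x =>
      if x = queenX then st else
      if x - y = queenX - queenY ∨ x + y = queenX + queenY then st else
      if (queenY - y).natAbs ≤ 2 ∧ (queenX - x).natAbs ≤ 2 then st else
      let m2 := st.1.modify y.toNat (fun row => row.set! x.toNat 2)
      let s := st.2 + 1
      let m0 := m2.modify y.toNat (fun row => row.set! x.toNat 0)
      (m0, s)) st) (matrix, 0)

def count (n : Int) : Int :=
  let matrix := ((PySem.List.pyRange 0 n 1).map (fun _j =>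
    ((PySem.List.pyRange 0 n 1).map (fun _i => (0 : Int))).toArray)).toArray
  let queen : Int := 1
  ((PySem.List.pyRange 0 n 1).foldl (fun (st : Array (Array Int) × Int) y =>
    (PySem.List.pyRange 0 n 1).foldl (fun st x =>
      let m1 := st.1.modify y.toNat (fun row => row.set! x.toNat queen)
      let r := possibleKnightPositions n m1 y x
      let m0 := r.1.modify y.toNat (fun row => row.set! x.toNat 0)
      (m0, st.2 + r.2)) st) (matrix, 0)).2

-- ===== PORT B =====
def count_alt (n : Int) : Int :=
  (PySem.List.pyRange 0 n 1).foldl (fun total qy =>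
    (PySem.List.pyRange 0 n 1).foldl (fun total qx =>
      (PySem.List.pyRange 0 n 1).foldl (fun total y =>
        if y = qy then total else
        let dy := y - qy
        if -2 ≤ dy ∧ dy ≤ 2 then
          total + (n - (min (qx + 2) (n - 1) - max (qx - 2) 0 + 1))
        else
          let bad : Int := 1
          let bad := if 0 ≤ qx + dy ∧ qx + dy < n then bad + 1 else bad
          let bad := if 0 ≤ qx - dy ∧ qx - dy < n then bad + 1 else bad
          total + (n - bad)) total) total) 0

-- ===== PRECONDITION & SPEC =====
def Spec_count (n : Int) (out : Int) : Prop := out = count_alt n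
instance (n : Int) (out : Int) : Decidable (Spec_count n out) := by unfold Spec_count; infer_instance

-- ===== CLAIM (what is proved, stated in full; the proofs are below) =====
def Claim_equal_count : Prop := ∀ (n : Int), Dom_count n → Spec_count n (count n)

-- ===== LEMMAS AND PROOFS =====

-- a fold whose step commutes with translation of the accumulator can be started at 0
theorem foldl_shift (f : Int → Int → Int) (h : ∀ s c x, f (s + c) x = f s x + c) :
    ∀ (l : List Int) (s : Int), l.foldl f s = s + l.foldl f 0 := by
  intro l
  induction l with
  | nil => intro s; simp
  | cons x l ih =>
    intro s
    have hs : f s x = f 0 x + s := by have := h 0 s x; simpa using this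
    simp only [List.foldl_cons]
    rw [ih (f s x), ih (f 0 x), hs]
    ring

-- the second component of a pair-state fold, when it never reads the first component
theorem foldl_snd {α β : Type} (f : β × Int → α → β × Int) (g : Int → α → Int)
    (h : ∀ st a, (f st a).2 = g st.2 a) :
    ∀ (l : List α) (st : β × Int), (l.foldl f st).2 = l.foldl g st.2 := by
  intro l
  induction l with
  | nil => intro st; rfl
  | cons a l ih => intro st; simp only [List.foldl_cons, ih, h]

-- empty range for non-positive bound
theorem pyRange_nonpos {n : Int} (h : n ≤ 0) : PySem.List.pyRange 0 n 1 = [] := by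
  apply List.eq_nil_iff_forall_not_mem.mpr
  intro x hx
  have := PySem.List.mem_pyRange_one.mp hx
  omega

-- A's inner x-loop body, on the sum component only
def innerA (qy qx y : Int) (s x : Int) : Int :=
  if x = qx then s else
  if x - y = qx - qy ∨ x + y = qx + qy then s else
  if (qy - y).natAbs ≤ 2 ∧ (qx - x).natAbs ≤ 2 then s else s + 1

-- A's helper, stripped of the matrix it writes and restores
def pkpSum (n qy qx : Int) : Int :=
  (PySem.List.pyRange 0 n 1).foldl (fun s y =>
    if y = qy then s else (PySem.List.pyRange 0 n 1).foldl (innerA qy qx y) s) 0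

theorem pkp_snd (n : Int) (m : Array (Array Int)) (qy qx : Int) :
    (possibleKnightPositions n m qy qx).2 = pkpSum n qy qx := by
  unfold possibleKnightPositions pkpSum
  apply foldl_snd
  intro st y
  by_cases hy : y = qy
  · simp [hy]
  · simp only [hy, if_false]
    apply foldl_snd
    intro st x
    unfold innerA
    split_ifs <;> rfl

theorem count_eq (n : Int) :
    count n = (PySem.List.pyRange 0 n 1).foldl (fun s y =>
      (PySem.List.pyRange 0 n 1).foldl (fun s x => s + pkpSum n y x) s) 0 := by
  unfold count
  apply foldl_snd
  intro st y
  apply foldl_snd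
  intro st x
  simp [pkp_snd]

-- counting the x in [0,k) outside an interval [a,b]
theorem rowA_interval (a b : Int) (k : Nat) :
    ∀ s : Int, (PySem.List.pyRange 0 (k : Int) 1).foldl
        (fun s x => if a ≤ x ∧ x ≤ b then s else s + 1) s
      = s + ((k : Int) - max 0 (min (k : Int) (b + 1) - max 0 a)) := by
  induction k with
  | zero =>
    intro s
    simp only [Nat.cast_zero, pyRange_nonpos le_rfl, List.foldl_nil]
    omega
  | succ k ih =>
    intro s
    have hk : ((k : Int) + 1) = ((k + 1 : Nat) : Int) := by push_cast; ring
    rw [← hk, PySem.List.pyRange_one_succ_right (by positivity), List.foldl_append]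
    simp only [List.foldl_cons, List.foldl_nil, ih]
    split_ifs <;> omega

-- counting the x in [0,k) distinct from three pairwise distinct points
theorem rowA_points (p1 p2 p3 : Int) (h12 : p1 ≠ p2) (h13 : p1 ≠ p3) (h23 : p2 ≠ p3) (k : Nat) :
    ∀ s : Int, (PySem.List.pyRange 0 (k : Int) 1).foldl
        (fun s x => if x = p1 ∨ x = p2 ∨ x = p3 then s else s + 1) s
      = s + ((k : Int)
          - ((if 0 ≤ p1 ∧ p1 < (k : Int) then 1 else 0)
            + (if 0 ≤ p2 ∧ p2 < (k : Int) then 1 else 0)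
            + (if 0 ≤ p3 ∧ p3 < (k : Int) then 1 else 0))) := by
  induction k with
  | zero =>
    intro s
    simp only [Nat.cast_zero, pyRange_nonpos le_rfl, List.foldl_nil]
    split_ifs <;> omega
  | succ k ih =>
    intro s
    have hk : ((k : Int) + 1) = ((k + 1 : Nat) : Int) := by push_cast; ring
    rw [← hk, PySem.List.pyRange_one_succ_right (by positivity), List.foldl_append]
    simp only [List.foldl_cons, List.foldl_nil, ih]
    split_ifs <;> push_cast <;> omega

-- B's per-y contribution
def tB (n qy qx y : Int) : Int :=
  if y = qy then 0 else
  if -2 ≤ y - qy ∧ y - qy ≤ 2 then n - (min (qx + 2) (n - 1) - max (qx - 2) 0 + 1)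
  else n - (1 + (if 0 ≤ qx + (y - qy) ∧ qx + (y - qy) < n then 1 else 0)
              + (if 0 ≤ qx - (y - qy) ∧ qx - (y - qy) < n then 1 else 0))

-- B's y-fold step is a pure translation by tB
theorem stepB_eq (n qy qx : Int) :
    (fun (total y : Int) =>
        if y = qy then total else
        let dy := y - qy
        if -2 ≤ dy ∧ dy ≤ 2 then
          total + (n - (min (qx + 2) (n - 1) - max (qx - 2) 0 + 1))
        else
          let bad : Int := 1
          let bad := if 0 ≤ qx + dy ∧ qx + dy < n then bad + 1 else bad
          let bad := if 0 ≤ qx - dy ∧ qx - dy < n then bad + 1 else bad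
          total + (n - bad))
      = fun total y => total + tB n qy qx y := by
  funext total y
  unfold tB
  dsimp only []
  split_ifs <;> ring

-- A's per-y contribution (the stripped inner fold from 0)
def tA (n qy qx y : Int) : Int :=
  if y = qy then 0 else (PySem.List.pyRange 0 n 1).foldl (innerA qy qx y) 0

theorem innerA_shift (qy qx y : Int) : ∀ s c x, innerA qy qx y (s + c) x = innerA qy qx y s x + c := by
  intro s c x
  unfold innerA
  split_ifs <;> ring

theorem stepA_eq (n qy qx : Int) :
    (fun (s y : Int) => if y = qy then s else (PySem.List.pyRange 0 n 1).foldl (innerA qy qx y) s)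
      = fun s y => s + tA n qy qx y := by
  funext s y
  unfold tA
  by_cases hy : y = qy
  · simp [hy]
  · simp only [hy, if_false]
    exact foldl_shift _ (innerA_shift qy qx y) _ s

-- the per-row values agree: A's inner x-scan equals B's closed form
theorem row_eq (k : Nat) (qy qx y : Int) (hqx : 0 ≤ qx ∧ qx < (k : Int)) :
    tA (k : Int) qy qx y = tB (k : Int) qy qx y := by
  unfold tA tB
  by_cases hyq : y = qy
  · simp [hyq]
  · simp only [hyq, if_false]
    by_cases hbox : -2 ≤ y - qy ∧ y - qy ≤ 2
    · rw [if_pos hbox]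
      have hfun : innerA qy qx y = fun s x => if qx - 2 ≤ x ∧ x ≤ qx + 2 then s else s + 1 := by
        funext s x
        unfold innerA
        split_ifs <;> omega
      rw [hfun, rowA_interval]
      simp only [min_def, max_def]
      split_ifs <;> omega
    · rw [if_neg hbox]
      have hfun : innerA qy qx y
          = fun s x => if x = qx ∨ x = qx + (y - qy) ∨ x = qx - (y - qy) then s else s + 1 := by
        funext s x
        unfold innerA
        split_ifs <;> omega
      rw [hfun, rowA_points qx (qx + (y - qy)) (qx - (y - qy)) (by omega) (by omega) (by omega)]
      split_ifs <;> omega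

-- ===== VERDICT (by name: the statement is the Claim_ definition above) =====
theorem count_spec : Claim_equal_count := by
  intro n _
  unfold Spec_count
  rw [count_eq]
  unfold count_alt
  by_cases hn : n ≤ 0
  · rw [pyRange_nonpos hn]; rfl
  · obtain ⟨k, hk⟩ : ∃ k : Nat, n = (k : Int) := ⟨n.toNat, by omega⟩
    subst hk
    apply PySem.List.foldl_congr_mem
    intro s qy hqy
    apply PySem.List.foldl_congr_mem
    intro s qx hqx
    have hqx' := PySem.List.mem_pyRange_one.mp hqx
    rw [stepB_eq, PySem.List.foldl_add]
    unfold pkpSum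
    rw [stepA_eq, PySem.List.foldl_add]
    have hmap : List.map (tA (k : Int) qy qx) (PySem.List.pyRange 0 (k : Int) 1)
        = List.map (tB (k : Int) qy qx) (PySem.List.pyRange 0 (k : Int) 1) := by
      apply List.map_congr_left
      intro y _
      exact row_eq k qy qx y hqx'
    rw [hmap]
    ring
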